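-- pv_equiv track=rewrite | github.com/Yash9988/self-learn | DP/MinWindowSubSeq.py | MinWindowSubSeq
-- ===== SOURCE A (Python) =====
-- def MinWindowSubSeq(arr: list, window: int) -> int:
--     if (N := len(arr)) <= window:                       # Check if array is equal (or less) than the window size
--         return min(arr)                                 # Minimum sum is the min-element
--
--     selected = [0 for _ in range(N)]                    # Set flag for each element to track selection
--     min_sum = 0                                         # Initialise variable to hold the min-sum
--
--     for i in range(window - 1, N):                      # Start from the end element of the first window
--         min_, idx, new = arr[i], i, 1                   # Initialise variables to track the min-element
--
--         for j in range(1, window):                      # Iterate through the window in reverse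
--             if selected[i - j]:                         # Check if any element from the window is already selected
--                 new = 0                                 # Flag no new element being selected in the current window
--                 break                                   # Break out of the loop
--             elif arr[i - j] < min_:                     # Check if any element in window is smaller than current min
--                 min_, idx = arr[i - j], i - j           # Update the respective tracking variable
--
--         if new:                                         # Check if any new element was selected from the window
--             selected[idx] = 1                           # Update the element's flag as 1 (True)
--             min_sum += min_                             # Add element's value to the min-sum variable
--
--     return min_sum                                      # Return the result
-- ===== SOURCE B (Python) =====
-- def MinWindowSubSeq(arr: list, window: int) -> int:
--     n = len(arr)
--     if n <= window:
--         return min(arr)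
--
--     total = 0
--     i = window - 1                                  # end of the first window
--     while i < n:                                    # each iteration SELECTS; overlapping windows are jumped over
--         m, idx = arr[i - window + 1], i - window + 1
--         for k in range(i - window + 2, i + 1):      # forward scan, '<=' keeps the rightmost minimum
--             if arr[k] <= m:
--                 m, idx = arr[k], k
--         total += m
--         i = idx + window                            # first window end not containing the chosen index
--     return total
-- ===== Notes on version B (the rewrite author's own statement) =====
-- stated objective: alternative
-- what changed: B drops A's selected-flag array and per-position backward break-scan: it jumps straight from one selection to the end of the next non-overlapping window, finding each window's rightmost minimum with a single forward <=-scan.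
-- outside the precondition, e.g. on MinWindowSubSeq([1, 2], 0): A returns 5, B raises IndexError; on MinWindowSubSeq([3, 1, 2], 0): A returns 8, B raises IndexError
import Mathlib
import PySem

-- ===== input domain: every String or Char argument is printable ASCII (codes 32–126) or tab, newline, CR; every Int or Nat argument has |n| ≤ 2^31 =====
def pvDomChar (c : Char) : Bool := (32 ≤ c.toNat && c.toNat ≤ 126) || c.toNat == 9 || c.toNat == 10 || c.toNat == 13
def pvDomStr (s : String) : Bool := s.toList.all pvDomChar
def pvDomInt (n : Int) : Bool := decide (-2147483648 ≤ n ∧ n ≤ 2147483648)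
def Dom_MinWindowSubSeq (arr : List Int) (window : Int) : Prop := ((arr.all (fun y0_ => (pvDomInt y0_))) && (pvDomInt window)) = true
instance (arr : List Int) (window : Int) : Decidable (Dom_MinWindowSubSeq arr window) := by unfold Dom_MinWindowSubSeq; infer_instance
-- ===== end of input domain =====

-- B replaces A's selected-flag array and per-position backward break-scan by a greedy loop that
-- jumps from each selection directly to the end of the next non-overlapping window (objective: alternative).

-- ===== PORT A =====
-- inner 'for j in range(1, window)' loop with its break; (m, idx, nw) = (min_, idx, new)
def pvAInner (arr : List Int) (selected : List Int) (i : Int)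
    (js : List Int) (m idx nw : Int) : Int × Int × Int :=
  match js with
  | [] => (m, idx, nw)
  | j :: rest =>
    if PySem.List.pyGetD selected (i - j) 0 ≠ 0 then (m, idx, 0)
    else if PySem.List.pyGetD arr (i - j) 0 < m then
      pvAInner arr selected i rest (PySem.List.pyGetD arr (i - j) 0) (i - j) nw
    else
      pvAInner arr selected i rest m idx nw

-- body of 'for i in range(window - 1, N)'
def pvAStep (arr : List Int) (window : Int) (st : List Int × Int) (i : Int) : List Int × Int :=
  let r := pvAInner arr st.1 i (PySem.List.pyRange 1 window 1) (PySem.List.pyGetD arr i 0) i 1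
  if r.2.2 ≠ 0 then (PySem.List.pySetD st.1 r.2.1 1, st.2 + r.1) else st

-- min(arr) on an empty list raises ValueError in Python: arr = [] is outside Pre_, .getD 0 is never reached there
def MinWindowSubSeq (arr : List Int) (window : Int) : Int :=
  if (arr.length : Int) ≤ window then (PySem.List.min? arr (fun x => x)).getD 0
  else
    ((PySem.List.pyRange (window - 1) (arr.length) 1).foldl (pvAStep arr window)
      ((PySem.List.pyRange 0 (arr.length) 1).map (fun _ => (0 : Int)), 0)).2

-- ===== PORT B =====
-- 'for k in range(i - window + 2, i + 1)' forward scan keeping the rightmost minimum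
def pvBScan (arr : List Int) (ks : List Int) (m idx : Int) : Int × Int :=
  match ks with
  | [] => (m, idx)
  | k :: rest =>
    if PySem.List.pyGetD arr k 0 ≤ m then pvBScan arr rest (PySem.List.pyGetD arr k 0) k
    else pvBScan arr rest m idx

-- 'while i < n' loop; each iteration moves i forward by at least 1 (window ≥ 1), so fuel = len(arr) suffices
def pvBLoop (arr : List Int) (n window : Int) (fuel : Nat) (i total : Int) : Int :=
  match fuel with
  | 0 => total
  | fuel + 1 =>
    if i < n then
      let st := pvBScan arr (PySem.List.pyRange (i - window + 2) (i + 1) 1)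
                  (PySem.List.pyGetD arr (i - window + 1) 0) (i - window + 1)
      pvBLoop arr n window fuel (st.2 + window) (total + st.1)
    else total

def MinWindowSubSeq_alt (arr : List Int) (window : Int) : Int :=
  if (arr.length : Int) ≤ window then (PySem.List.min? arr (fun x => x)).getD 0
  else pvBLoop arr (arr.length) window arr.length (window - 1) 0

-- ===== PRECONDITION & SPEC =====
-- Pre_ excludes arr = [] (A raises ValueError/IndexError) and window ≤ 0, where A's value comes from
-- negative-index wraparound of arr[i-j] and B's natural loop raises IndexError instead of returning.
def Pre_MinWindowSubSeq (arr : List Int) (window : Int) : Prop := arr ≠ [] ∧ 1 ≤ window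
instance (arr : List Int) (window : Int) : Decidable (Pre_MinWindowSubSeq arr window) := by
  unfold Pre_MinWindowSubSeq; infer_instance
def pvWitness_MinWindowSubSeq : List Int × Int := ([3, 1, 2], 2)

def Spec_MinWindowSubSeq (arr : List Int) (window : Int) (out : Int) : Prop := out = MinWindowSubSeq_alt arr window
instance (arr : List Int) (window : Int) (out : Int) : Decidable (Spec_MinWindowSubSeq arr window out) := by unfold Spec_MinWindowSubSeq; infer_instance

-- ===== CLAIM (what is proved, stated in full; the proofs are below) =====
def Claim_equal_MinWindowSubSeq : Prop := ∀ (arr : List Int) (window : Int), Dom_MinWindowSubSeq arr window → Pre_MinWindowSubSeq arr window → Spec_MinWindowSubSeq arr window (MinWindowSubSeq arr window)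

-- ===== LEMMAS AND PROOFS =====

-- canonical (min value, rightmost index attaining it) over positions lo..hi of arr
def pvCanon (arr : List Int) (lo hi : Int) : Int × Int :=
  if hi ≤ lo then (PySem.List.pyGetD arr lo 0, lo)
  else
    let r := pvCanon arr lo (hi - 1)
    if PySem.List.pyGetD arr hi 0 ≤ r.1 then (PySem.List.pyGetD arr hi 0, hi) else r
termination_by (hi - lo).toNat
decreasing_by omega

theorem pvCanon_base (arr : List Int) (lo hi : Int) (h : hi ≤ lo) :
    pvCanon arr lo hi = (PySem.List.pyGetD arr lo 0, lo) := by
  rw [pvCanon]; simp [h]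

theorem pvCanon_step (arr : List Int) (lo hi : Int) (h : lo < hi) :
    pvCanon arr lo hi =
      (if PySem.List.pyGetD arr hi 0 ≤ (pvCanon arr lo (hi - 1)).1
        then (PySem.List.pyGetD arr hi 0, hi) else pvCanon arr lo (hi - 1)) := by
  rw [pvCanon]; simp [not_le.2 h]

theorem pvCanon_snd_mem (arr : List Int) (lo hi : Int) (h : lo ≤ hi) :
    lo ≤ (pvCanon arr lo hi).2 ∧ (pvCanon arr lo hi).2 ≤ hi := by
  by_cases hlt : lo < hi
  · rw [pvCanon_step arr lo hi hlt]
    have ih := pvCanon_snd_mem arr lo (hi - 1) (by omega)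
    split <;> omega
  · rw [pvCanon_base arr lo hi (by omega)]; omega
termination_by (hi - lo).toNat
decreasing_by omega

theorem pvCanon_left (arr : List Int) (lo hi : Int) (h : lo < hi) :
    pvCanon arr lo hi =
      (if PySem.List.pyGetD arr lo 0 < (pvCanon arr (lo + 1) hi).1
        then (PySem.List.pyGetD arr lo 0, lo) else pvCanon arr (lo + 1) hi) := by
  by_cases hlt : lo + 1 < hi
  · rw [pvCanon_step arr lo hi h, pvCanon_step arr (lo + 1) hi hlt,
      pvCanon_left arr lo (hi - 1) (by omega)]
    generalize pvCanon arr (lo + 1) (hi - 1) = r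
    obtain ⟨r1, r2⟩ := r
    split_ifs <;> first | rfl | (exfalso; omega)
  · have hhi : hi = lo + 1 := by omega
    subst hhi
    have e : lo + 1 - 1 = lo := by ring
    rw [pvCanon_step arr lo (lo + 1) h, e, pvCanon_base arr lo lo le_rfl,
      pvCanon_base arr (lo + 1) (lo + 1) le_rfl]
    split_ifs <;> first | rfl | (exfalso; omega)
termination_by (hi - lo).toNat
decreasing_by omega

theorem pvBScan_append (arr : List Int) (l1 l2 : List Int) (m idx : Int) :
    pvBScan arr (l1 ++ l2) m idx
      = pvBScan arr l2 (pvBScan arr l1 m idx).1 (pvBScan arr l1 m idx).2 := by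
  induction l1 generalizing m idx with
  | nil => simp [pvBScan]
  | cons k rest ih =>
    simp only [List.cons_append, pvBScan]
    split <;> exact ih _ _

theorem pvBScan_canon (arr : List Int) (lo hi : Int) (h : lo ≤ hi) :
    pvBScan arr (PySem.List.pyRange (lo + 1) (hi + 1) 1) (PySem.List.pyGetD arr lo 0) lo
      = pvCanon arr lo hi := by
  by_cases hlt : lo < hi
  · have hpre := pvBScan_canon arr lo (hi - 1) (by omega)
    have e : hi - 1 + 1 = hi := by ring
    rw [e] at hpre
    rw [PySem.List.pyRange_one_succ_right (by omega : lo + 1 ≤ hi), pvBScan_append, hpre,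
      pvCanon_step arr lo hi hlt]
    simp only [pvBScan]
  · have hhi : hi = lo := by omega
    rw [hhi, PySem.List.pyRange_one_eq_nil (by omega), pvCanon_base arr lo lo le_rfl]
    rfl
termination_by (hi - lo).toNat
decreasing_by omega

theorem pvAInner_flag (arr selected : List Int) (i : Int) (js : List Int) :
    ∀ (m idx nw : Int), (∃ j ∈ js, PySem.List.pyGetD selected (i - j) 0 ≠ 0) →
    (pvAInner arr selected i js m idx nw).2.2 = 0 := by
  induction js with
  | nil => intro m idx nw h; simp at h
  | cons j rest ih =>
    intro m idx nw h
    simp only [pvAInner]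
    by_cases hf : PySem.List.pyGetD selected (i - j) 0 ≠ 0
    · simp [hf]
    · have : ∃ j ∈ rest, PySem.List.pyGetD selected (i - j) 0 ≠ 0 := by
        rcases h with ⟨j0, hj0, hne⟩
        rcases List.mem_cons.1 hj0 with rfl | hmem
        · exact absurd hne hf
        · exact ⟨j0, hmem, hne⟩
      simp only [hf, if_false]
      split
      · exact ih _ _ _ this
      · exact ih _ _ _ this

theorem pvAInner_canon (arr selected : List Int) (hi W : Int)
    (hflags : ∀ p : Int, hi - W + 1 ≤ p → p ≤ hi - 1 → PySem.List.pyGetD selected p 0 = 0) :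
    ∀ (cnt : Nat) (a : Int), (W - a).toNat = cnt → 1 ≤ a → a ≤ W →
    pvAInner arr selected hi (PySem.List.pyRange a W 1)
        (pvCanon arr (hi - a + 1) hi).1 (pvCanon arr (hi - a + 1) hi).2 1
      = ((pvCanon arr (hi - W + 1) hi).1, (pvCanon arr (hi - W + 1) hi).2, 1) := by
  intro cnt
  induction cnt using Nat.strong_induction_on with
  | _ cnt ih =>
  intro a hcnt ha1 haW
  by_cases hlt : a < W
  · rw [PySem.List.pyRange_one_cons hlt]
    simp only [pvAInner]
    have hflag : PySem.List.pyGetD selected (hi - a) 0 = 0 := hflags _ (by omega) (by omega)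
    rw [if_neg (by simp [hflag])]
    have hleft := pvCanon_left arr (hi - a) hi (by omega)
    have e : hi - (a + 1) + 1 = hi - a := by ring
    have hrec := ih ((W - (a + 1)).toNat) (by omega) (a + 1) rfl (by omega) (by omega)
    rw [e] at hrec
    by_cases hc : PySem.List.pyGetD arr (hi - a) 0 < (pvCanon arr (hi - a + 1) hi).1
    · rw [if_pos hc]
      rw [hleft, if_pos hc] at hrec
      exact hrec
    · rw [if_neg hc]
      rw [hleft, if_neg hc] at hrec
      exact hrec
  · have haW' : a = W := by omega
    subst haW'
    rw [PySem.List.pyRange_one_eq_nil (le_refl a)]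
    rfl

theorem pvBLoop_exit (arr : List Int) (n window : Int) (fuel : Nat) (i total : Int)
    (h : ¬ i < n) : pvBLoop arr n window fuel i total = total := by
  cases fuel <;> simp [pvBLoop, h]

theorem pvGetD_setD (xs : List Int) (idx p v d : Int) (h0 : 0 ≤ idx) (h1 : idx < (xs.length : Int))
    (hp0 : 0 ≤ p) :
    PySem.List.pyGetD (PySem.List.pySetD xs idx v) p d
      = if p = idx then v else PySem.List.pyGetD xs p d := by
  rw [show idx = ((idx.toNat : Nat) : Int) from (Int.toNat_of_nonneg h0).symm,
    show p = ((p.toNat : Nat) : Int) from (Int.toNat_of_nonneg hp0).symm,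
    PySem.List.pyGetD_pySetD_natCast xs idx.toNat p.toNat v d (by omega)]
  simp
  split_ifs <;> first | rfl | omega

theorem pvConst_getD (xs : List Int) (p : Int) (hall : ∀ x ∈ xs, x = 0) :
    PySem.List.pyGetD xs p 0 = 0 := by
  cases h : PySem.List.pyGet? xs p with
  | none => simp [PySem.List.pyGetD, h]
  | some x =>
    have hx := PySem.List.mem_of_pyGet?_eq_some xs h
    simp [PySem.List.pyGetD, h, hall x hx]

theorem pvZeros_getD (N : Int) (p : Int) :
    PySem.List.pyGetD ((PySem.List.pyRange 0 N 1).map (fun _ => (0 : Int))) p 0 = 0 := by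
  apply pvConst_getD
  intro x hx
  rcases List.mem_map.1 hx with ⟨a, -, e⟩
  exact e.symm

theorem pvMain (arr : List Int) (W : Int) (hW : 1 ≤ W) (_hWN : W < (arr.length : Int)) :
    ∀ (cnt : Nat) (i last s : Int) (selected : List Int) (fuel : Nat),
    ((arr.length : Int) - i).toNat = cnt →
    W - 1 ≤ i → i ≤ (arr.length : Int) →
    (selected.length : Int) = (arr.length : Int) →
    -1 ≤ last → last ≤ i - 1 →
    (∀ p : Int, i - W + 1 ≤ p → p < (arr.length : Int) →
      (PySem.List.pyGetD selected p 0 ≠ 0 ↔ p = last)) →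
    ((arr.length : Int) - i).toNat ≤ fuel →
    ((PySem.List.pyRange i (arr.length) 1).foldl (pvAStep arr W) (selected, s)).2
      = pvBLoop arr (arr.length) W fuel (max i (last + W)) s := by
  intro cnt
  induction cnt using Nat.strong_induction_on with
  | _ cnt ih =>
  intro i last s selected fuel hcnt hiW hiN hlen hl0 hl1 hinv hfuel
  by_cases hi : i < (arr.length : Int)
  · rw [PySem.List.pyRange_one_cons hi]
    simp only [List.foldl_cons]
    by_cases hsk : i - W + 1 ≤ last
    · -- a selected index is still inside the lookback window: A skips, B is already past i
      have hex : ∃ j ∈ PySem.List.pyRange 1 W 1, PySem.List.pyGetD selected (i - j) 0 ≠ 0 := by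
        refine ⟨i - last, PySem.List.mem_pyRange_one.2 ⟨by omega, by omega⟩, ?_⟩
        have e : i - (i - last) = last := by ring
        rw [e]
        exact (hinv last (by omega) (by omega)).2 rfl
      have hz := pvAInner_flag arr selected i (PySem.List.pyRange 1 W 1)
          (PySem.List.pyGetD arr i 0) i 1 hex
      have hstep : pvAStep arr W (selected, s) i = (selected, s) := by
        simp [pvAStep, hz]
      rw [hstep]
      have hrec := ih (((arr.length : Int) - (i + 1)).toNat) (by omega) (i + 1) last s selected
        fuel rfl (by omega) (by omega) hlen hl0 (by omega)
        (fun p hp hpN => hinv p (by omega) hpN) (by omega)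
      have hm : max i (last + W) = max (i + 1) (last + W) := by omega
      rw [hm]
      exact hrec
    · -- no selected index in the lookback window: A selects the window minimum, B scans the same window
      have hflags : ∀ p : Int, i - W + 1 ≤ p → p ≤ i - 1 →
          PySem.List.pyGetD selected p 0 = 0 := by
        intro p hp1 hp2
        by_contra hne
        have := (hinv p hp1 (by omega)).1 hne
        omega
      have hscan := pvAInner_canon arr selected i W hflags ((W - 1).toNat) 1 rfl le_rfl hW
      have e0 : i - 1 + 1 = i := by ring
      rw [e0, pvCanon_base arr i i le_rfl] at hscan
      have hcm := pvCanon_snd_mem arr (i - W + 1) i (by omega)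
      have hstep : pvAStep arr W (selected, s) i =
          (PySem.List.pySetD selected (pvCanon arr (i - W + 1) i).2 1,
            s + (pvCanon arr (i - W + 1) i).1) := by
        simp [pvAStep, hscan]
      rw [hstep]
      have hmax : max i (last + W) = i := by omega
      rw [hmax]
      obtain ⟨f, rfl⟩ : ∃ f, fuel = f + 1 := by
        cases fuel with
        | zero => exact absurd hfuel (by omega)
        | succ f => exact ⟨f, rfl⟩
      have hbs := pvBScan_canon arr (i - W + 1) i (by omega)
      have e1 : i - W + 1 + 1 = i - W + 2 := by ring
      rw [e1] at hbs
      simp only [pvBLoop, if_pos hi, hbs]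
      have hrec := ih (((arr.length : Int) - (i + 1)).toNat) (by omega) (i + 1)
        ((pvCanon arr (i - W + 1) i).2) (s + (pvCanon arr (i - W + 1) i).1)
        (PySem.List.pySetD selected (pvCanon arr (i - W + 1) i).2 1) f rfl
        (by omega) (by omega)
        (by rw [PySem.List.length_pySetD]; exact hlen)
        (by omega) (by omega)
        (by
          intro p hp1 hp2
          rw [pvGetD_setD selected (pvCanon arr (i - W + 1) i).2 p 1 0 (by omega) (by omega)
            (by omega)]
          by_cases hpe : p = (pvCanon arr (i - W + 1) i).2
          · simp [hpe]
          · have hz0 : PySem.List.pyGetD selected p 0 = 0 := by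
              by_contra hne
              have := (hinv p (by omega) hp2).1 hne
              omega
            simp [hpe, hz0])
        (by omega)
      have hm2 : max (i + 1) ((pvCanon arr (i - W + 1) i).2 + W)
          = (pvCanon arr (i - W + 1) i).2 + W := by omega
      rw [hm2] at hrec
      exact hrec
  · rw [PySem.List.pyRange_one_eq_nil (by omega)]
    simp only [List.foldl_nil]
    rw [pvBLoop_exit _ _ _ _ _ _ (by omega)]

-- ===== VERDICT (by name: the statement is the Claim_ definition above) =====
theorem MinWindowSubSeq_spec : Claim_equal_MinWindowSubSeq := by
  intro arr window _hdom hpre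
  obtain ⟨hne, hW⟩ := hpre
  unfold Spec_MinWindowSubSeq MinWindowSubSeq MinWindowSubSeq_alt
  by_cases hle : (arr.length : Int) ≤ window
  · rw [if_pos hle, if_pos hle]
  · rw [if_neg hle, if_neg hle]
    have hWN : window < (arr.length : Int) := by omega
    have hmain := pvMain arr window hW hWN (((arr.length : Int) - (window - 1)).toNat)
      (window - 1) (-1) 0 ((PySem.List.pyRange 0 (arr.length) 1).map (fun _ => (0 : Int)))
      arr.length rfl le_rfl (by omega)
      (by simp [PySem.List.length_pyRange_one])
      (by omega) (by omega)
      (by intro p hp1 hp2; rw [pvZeros_getD]; simp; omega)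
      (by omega)
    have hm : max (window - 1) (-1 + window) = window - 1 := by omega
    rw [hm] at hmain
    exact hmain
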